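-- pv_equiv track=rewrite | github.com/appugowdahc/HackerRank_problems | easy_problems/beautiful-triplets.py | count_beautiful_triplets
-- ===== SOURCE A (Python) =====
-- def count_beautiful_triplets(arr, d):
--     count = 0
--     n = len(arr)
--
--     for i in range(n):
--         for j in range(i + 1, n):
--             if arr[j] - arr[i] == d:
--                 for k in range(j + 1, n):
--                     if arr[k] - arr[j] == d:
--                         count += 1
--
--     return count
-- ===== SOURCE B (Python) =====
-- def count_beautiful_triplets(arr, d):
--     # One pass with prefix/suffix value counters: for the middle element a,
--     # add (#earlier a-d) * (#later a+d).
--     right = {}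
--     for a in arr:
--         right[a] = right.get(a, 0) + 1
--     left = {}
--     count = 0
--     for a in arr:
--         right[a] = right.get(a, 0) - 1
--         count += left.get(a - d, 0) * right.get(a + d, 0)
--         left[a] = left.get(a, 0) + 1
--     return count
-- ===== Notes on version B (the rewrite author's own statement) =====
-- stated objective: faster
-- what changed: Replaced the triple nested index loop with a single pass that maintains hash-map counters of values seen so far (left) and still ahead (right), adding left[a-d]*right[a+d] for each middle element a.
import Mathlib
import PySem

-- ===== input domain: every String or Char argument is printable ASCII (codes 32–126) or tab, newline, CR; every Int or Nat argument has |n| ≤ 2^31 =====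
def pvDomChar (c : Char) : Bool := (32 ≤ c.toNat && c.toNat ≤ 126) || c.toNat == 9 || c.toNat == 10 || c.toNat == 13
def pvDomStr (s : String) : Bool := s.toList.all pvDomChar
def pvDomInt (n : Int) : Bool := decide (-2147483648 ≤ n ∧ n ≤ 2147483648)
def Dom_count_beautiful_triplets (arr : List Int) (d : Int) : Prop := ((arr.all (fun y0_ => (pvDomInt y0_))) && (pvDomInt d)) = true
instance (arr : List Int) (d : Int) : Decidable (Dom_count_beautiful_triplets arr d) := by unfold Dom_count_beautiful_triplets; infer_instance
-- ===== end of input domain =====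

-- B replaces A's triple nested index loop by a single pass over the array with hash-map
-- counters of values before / after the current element (objective: faster, asymptotic).


-- ===== PORT A =====
def count_beautiful_triplets (arr : List Int) (d : Int) : Int :=
  let n : Int := PySem.List.len arr
  (PySem.List.pyRange 0 n 1).foldl (fun count i =>
    (PySem.List.pyRange (i + 1) n 1).foldl (fun count j =>
      if PySem.List.pyGetD arr j 0 - PySem.List.pyGetD arr i 0 = d then
        (PySem.List.pyRange (j + 1) n 1).foldl (fun count k =>
          if PySem.List.pyGetD arr k 0 - PySem.List.pyGetD arr j 0 = d then count + 1
          else count) count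
      else count) count) 0

-- ===== PORT B =====
def count_beautiful_triplets_alt (arr : List Int) (d : Int) : Int :=
  let right : PySem.Dict Int Int :=
    arr.foldl (fun r a => r.insert a (r.getD a 0 + 1)) PySem.Dict.empty
  let st :=
    arr.foldl (fun (st : PySem.Dict Int Int × PySem.Dict Int Int × Int) a =>
      let left := st.1
      let right := st.2.1
      let count := st.2.2
      let right := right.insert a (right.getD a 0 - 1)
      let count := count + left.getD (a - d) 0 * right.getD (a + d) 0
      let left := left.insert a (left.getD a 0 + 1)
      (left, right, count)) (PySem.Dict.empty, right, 0)
  st.2.2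

-- ===== PRECONDITION & SPEC =====
def Spec_count_beautiful_triplets (arr : List Int) (d : Int) (out : Int) : Prop := out = count_beautiful_triplets_alt arr d
instance (arr : List Int) (d : Int) (out : Int) : Decidable (Spec_count_beautiful_triplets arr d out) := by unfold Spec_count_beautiful_triplets; infer_instance

-- ===== CLAIM (what is proved, stated in full; the proofs are below) =====
def Claim_equal_count_beautiful_triplets : Prop := ∀ (arr : List Int) (d : Int), Dom_count_beautiful_triplets arr d → Spec_count_beautiful_triplets arr d (count_beautiful_triplets arr d)

-- ===== LEMMAS AND PROOFS =====

def trip (pre rest : List Int) (d : Int) : Int :=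
  match rest with
  | [] => 0
  | a :: rs => (pre.count (a - d) : Int) * (rs.count (a + d) : Int) + trip (pre ++ [a]) rs d

def aIdx (arr : List Int) (j : Nat) : Int := arr.getD j 0

def Rc (arr : List Int) (d : Int) (j : Nat) : Int := ((arr.drop (j + 1)).count (aIdx arr j + d) : Int)

def gfun (arr : List Int) (d : Int) (i j : Nat) : Int :=
  if aIdx arr j - aIdx arr i = d then Rc arr d j else 0

def RInt (arr : List Int) (d j : Int) : Int :=
  ((arr.drop (j + 1).toNat).count (PySem.List.pyGetD arr j 0 + d) : Int)

def Ssum (arr : List Int) (d i : Int) : Int :=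
  ((PySem.List.pyRange (i + 1) (PySem.List.len arr) 1).map
    (fun j => if PySem.List.pyGetD arr j 0 - PySem.List.pyGetD arr i 0 = d then RInt arr d j else 0)).sum

theorem count_fold (l : List Int) (A d c : Int) :
    l.foldl (fun c x => if x - A = d then c + 1 else c) c = c + (l.count (A + d) : Int) := by
  have h := PySem.List.foldl_count_if (fun x => decide (x - A = d)) l c
  simp only [decide_eq_true_eq] at h
  rw [h]
  congr 1
  norm_cast
  rw [List.count_eq_countP]
  apply List.countP_congr
  intro x _
  rcases eq_or_ne (A + d) x with hx | hx
  · have h1 : x - A = d := by omega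
    simp [hx, h1]
  · have h1 : ¬ (x - A = d) := by omega
    simp [h1]
    omega

theorem sum_swap_tri (N : Nat) (f : Nat → Nat → Int) :
    ∑ i ∈ Finset.range N, ∑ j ∈ Finset.Ico (i + 1) N, f i j
      = ∑ j ∈ Finset.range N, ∑ i ∈ Finset.range j, f i j := by
  induction N with
  | zero => simp
  | succ n ih =>
    rw [Finset.sum_range_succ, Finset.sum_range_succ]
    have h1 : ∀ i ∈ Finset.range n, ∑ j ∈ Finset.Ico (i+1) (n+1), f i j
        = (∑ j ∈ Finset.Ico (i+1) n, f i j) + f i n := by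
      intro i hi
      exact Finset.sum_Ico_succ_top (by have := Finset.mem_range.mp hi; omega) _
    rw [Finset.sum_congr rfl h1, Finset.sum_add_distrib, ih]
    simp

theorem card_filter_count (arr : List Int) (t : Int) :
    ∀ j, j ≤ arr.length →
      (((Finset.range j).filter (fun i => aIdx arr i = t)).card : Int) = ((arr.take j).count t : Int) := by
  intro j
  induction j with
  | zero => simp
  | succ m ih =>
    intro hm
    have hlt : m < arr.length := by omega
    rw [Finset.range_add_one, Finset.filter_insert]
    have htake : arr.take (m+1) = arr.take m ++ [arr[m]] := by
      rw [List.take_add_one]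
      simp [List.getElem?_eq_getElem hlt]
    rw [htake, List.count_append]
    by_cases hc : aIdx arr m = t
    · rw [if_pos hc, Finset.card_insert_of_notMem (by simp)]
      have : List.count t [arr[m]] = 1 := by
        simp [List.count_singleton]
        have : aIdx arr m = arr[m] := by simp [aIdx, List.getD_eq_getElem?_getD, List.getElem?_eq_getElem hlt]
        rw [← this, hc]
      rw [this]
      push_cast
      rw [ih (by omega)]
    · rw [if_neg hc]
      have : List.count t [arr[m]] = 0 := by
        simp [List.count_singleton]
        have h2 : aIdx arr m = arr[m] := by simp [aIdx, List.getD_eq_getElem?_getD, List.getElem?_eq_getElem hlt]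
        rw [← h2]
        intro h3
        exact hc h3
      rw [this, ih (by omega)]
      push_cast
      ring

theorem sum_map_range (n : Nat) (f : Nat → Int) :
    ((List.range n).map f).sum = ∑ k ∈ Finset.range n, f k := rfl

theorem inner_fold (arr : List Int) (d : Int) (j : Int) (hj : 0 ≤ j) (c : Int) :
    (PySem.List.pyRange (j + 1) (PySem.List.len arr) 1).foldl
      (fun c k => if PySem.List.pyGetD arr k 0 - PySem.List.pyGetD arr j 0 = d then c + 1 else c) c
      = c + RInt arr d j := by
  have h := PySem.List.foldl_pyRange_pyGetD arr 0
      (fun c x => if x - PySem.List.pyGetD arr j 0 = d then c + 1 else c) c (a := j + 1) (by omega)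
  rw [h, count_fold]
  rfl

theorem mid_fold (arr : List Int) (d : Int) (i : Int) (hi : 0 ≤ i) (c : Int) :
    (PySem.List.pyRange (i + 1) (PySem.List.len arr) 1).foldl
      (fun count j =>
        if PySem.List.pyGetD arr j 0 - PySem.List.pyGetD arr i 0 = d then
          (PySem.List.pyRange (j + 1) (PySem.List.len arr) 1).foldl (fun count k =>
            if PySem.List.pyGetD arr k 0 - PySem.List.pyGetD arr j 0 = d then count + 1
            else count) count
        else count) c
      = c + Ssum arr d i := by
  rw [PySem.List.foldl_congr_mem _ _
      (fun c j => c + (if PySem.List.pyGetD arr j 0 - PySem.List.pyGetD arr i 0 = d then RInt arr d j else 0)) c ?_]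
  · exact PySem.List.foldl_add _ _ c
  · intro acc j hjmem
    have hj : 0 ≤ j := by
      have := (PySem.List.mem_pyRange_one.mp hjmem).1
      omega
    beta_reduce
    by_cases hc : PySem.List.pyGetD arr j 0 - PySem.List.pyGetD arr i 0 = d
    · rw [if_pos hc, if_pos hc, inner_fold arr d j hj acc]
    · rw [if_neg hc, if_neg hc]
      ring

theorem A_outer (arr : List Int) (d : Int) :
    count_beautiful_triplets arr d = ((PySem.List.pyRange 0 (PySem.List.len arr) 1).map (Ssum arr d)).sum := by
  unfold count_beautiful_triplets
  rw [PySem.List.foldl_congr_mem _ _ (fun c i => c + Ssum arr d i) 0 ?_]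
  · rw [PySem.List.foldl_add]
    simp
  · intro acc i himem
    have hi : 0 ≤ i := (PySem.List.mem_pyRange_one.mp himem).1
    exact mid_fold arr d i hi acc

theorem Ssum_eq (arr : List Int) (d : Int) (i : Nat) :
    Ssum arr d (i : Int) = ∑ j ∈ Finset.Ico (i + 1) arr.length, gfun arr d i j := by
  rw [Finset.sum_Ico_eq_sum_range]
  unfold Ssum
  rw [PySem.List.pyRange_one, List.map_map]
  have hlen : ((PySem.List.len arr) - ((i : Int) + 1)).toNat = arr.length - (i + 1) := by
    simp only [PySem.List.len_eq]
    omega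
  rw [hlen]
  show ∑ k ∈ Finset.range (arr.length - (i + 1)), _ = _
  apply Finset.sum_congr rfl
  intro k _
  show (if PySem.List.pyGetD arr ((i : Int) + 1 + (k : Int)) 0 - PySem.List.pyGetD arr (i : Int) 0 = d
        then RInt arr d ((i : Int) + 1 + (k : Int)) else 0) = gfun arr d i (i + 1 + k)
  have e1 : ((i : Int) + 1 + (k : Int)) = ((i + 1 + k : Nat) : Int) := by push_cast; ring
  rw [e1, PySem.List.pyGetD_natCast, PySem.List.pyGetD_natCast]
  unfold gfun RInt Rc aIdx
  have e2 : ((((i + 1 + k : Nat) : Int)) + 1).toNat = i + 1 + k + 1 := by omega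
  rw [e2, PySem.List.pyGetD_natCast]

theorem middle_sum (arr : List Int) (d : Int) (j : Nat) (hjN : j ≤ arr.length) :
    ∑ i ∈ Finset.range j, gfun arr d i j
      = ((arr.take j).count (aIdx arr j - d) : Int) * Rc arr d j := by
  unfold gfun
  have h : ∀ i ∈ Finset.range j,
      (if aIdx arr j - aIdx arr i = d then Rc arr d j else 0)
        = (if aIdx arr i = aIdx arr j - d then Rc arr d j else 0) := by
    intro i _
    have : (aIdx arr j - aIdx arr i = d) ↔ (aIdx arr i = aIdx arr j - d) := by omega
    simp [this]
  rw [Finset.sum_congr rfl h, ← Finset.sum_filter, Finset.sum_const, nsmul_eq_mul,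
      card_filter_count arr _ j hjN]

theorem A_sumform (arr : List Int) (d : Int) :
    count_beautiful_triplets arr d = ∑ j ∈ Finset.range arr.length,
      ((arr.take j).count (aIdx arr j - d) : Int) * Rc arr d j := by
  rw [A_outer]
  rw [PySem.List.pyRange_one, List.map_map]
  have hlen : ((PySem.List.len arr) - 0).toNat = arr.length := by
    simp only [PySem.List.len_eq]; omega
  rw [hlen]
  rw [sum_map_range]
  have step2 : ∑ i ∈ Finset.range arr.length, (Ssum arr d ∘ fun k : Nat => 0 + (k : Int)) i
      = ∑ i ∈ Finset.range arr.length, ∑ j ∈ Finset.Ico (i + 1) arr.length, gfun arr d i j := by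
    apply Finset.sum_congr rfl
    intro i _
    show Ssum arr d (0 + (i : Int)) = _
    rw [zero_add, Ssum_eq]
  rw [step2, sum_swap_tri]
  apply Finset.sum_congr rfl
  intro j hj
  exact middle_sum arr d j (by have := Finset.mem_range.mp hj; omega)

theorem trip_eq_sum (d : Int) (rest : List Int) : ∀ (pre : List Int),
    trip pre rest d = ∑ j ∈ Finset.range rest.length,
      (((pre ++ rest.take j).count (aIdx rest j - d)) : Int) * ((rest.drop (j + 1)).count (aIdx rest j + d) : Int) := by
  induction rest with
  | nil => simp [trip]
  | cons a rs ih =>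
    intro pre
    rw [trip]
    simp only [List.length_cons]
    rw [Finset.sum_range_succ']
    have h0 : ((pre ++ List.take 0 (a :: rs)).count (aIdx (a :: rs) 0 - d) : Int) *
        ((List.drop (0 + 1) (a :: rs)).count (aIdx (a :: rs) 0 + d) : Int)
        = (pre.count (a - d) : Int) * (rs.count (a + d) : Int) := by
      simp [aIdx]
    rw [h0, ih (pre ++ [a])]
    rw [add_comm]
    congr 1
    apply Finset.sum_congr rfl
    intro j _
    have h1 : aIdx (a :: rs) (j + 1) = aIdx rs j := by simp [aIdx]
    have h2 : pre ++ List.take (j + 1) (a :: rs) = (pre ++ [a]) ++ List.take j rs := by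
      simp [List.take_succ_cons]
    have h3 : List.drop (j + 1 + 1) (a :: rs) = List.drop (j + 1) rs := by simp
    rw [h1, h2, h3]

theorem A_eq_trip (arr : List Int) (d : Int) :
    count_beautiful_triplets arr d = trip [] arr d := by
  rw [A_sumform, trip_eq_sum d arr []]
  apply Finset.sum_congr rfl
  intro j _
  simp [Rc]

theorem alt_loop (d : Int) (rest : List Int) : ∀ (pre : List Int)
    (left r : PySem.Dict Int Int) (count : Int),
    (∀ v, left.getD v 0 = (pre.count v : Int)) →
    (∀ v, r.getD v 0 = (rest.count v : Int)) →
    (rest.foldl (fun (st : PySem.Dict Int Int × PySem.Dict Int Int × Int) a =>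
      let left := st.1
      let right := st.2.1
      let count := st.2.2
      let right := right.insert a (right.getD a 0 - 1)
      let count := count + left.getD (a - d) 0 * right.getD (a + d) 0
      let left := left.insert a (left.getD a 0 + 1)
      (left, right, count)) (left, r, count)).2.2 = count + trip pre rest d := by
  induction rest with
  | nil => intro pre left r count _ _; simp [trip]
  | cons a rs ih =>
    intro pre left r count hl hr
    rw [List.foldl_cons, trip]
    have hr' : ∀ v, (r.insert a (r.getD a 0 - 1)).getD v 0 = (rs.count v : Int) := by
      intro v
      rw [PySem.Dict.getD_insert]
      by_cases hv : v = a
      · subst hv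
        rw [if_pos rfl, hr]
        simp [List.count_cons_self]
      · rw [if_neg hv, hr]
        simp [List.count_cons]
        omega
    have hl' : ∀ v, (left.insert a (left.getD a 0 + 1)).getD v 0 = ((pre ++ [a]).count v : Int) := by
      intro v
      rw [PySem.Dict.getD_insert]
      by_cases hv : v = a
      · subst hv
        rw [if_pos rfl, hl]
        simp [List.count_append]
      · rw [if_neg hv, hl]
        simp [List.count_append, List.count_singleton]
        omega
    rw [ih (pre ++ [a]) _ _ _ hl' hr']
    rw [hl, hr']
    ring

theorem alt_eq_trip (arr : List Int) (d : Int) :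
    count_beautiful_triplets_alt arr d = trip [] arr d := by
  unfold count_beautiful_triplets_alt
  rw [PySem.Dict.foldl_insert_getD_add_one_eq_counter]
  rw [alt_loop d arr [] _ _ 0 (by intro v; simp [PySem.Dict.getD_empty])
      (by intro v; rw [PySem.Dict.getD_counter])]
  simp

-- ===== VERDICT (by name: the statement is the Claim_ definition above) =====
theorem count_beautiful_triplets_spec : Claim_equal_count_beautiful_triplets := by
  intro arr d _
  unfold Spec_count_beautiful_triplets
  rw [A_eq_trip, alt_eq_trip]
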